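-- pv_equiv track=rewrite | github.com/boompig/sudoku | sudoku/solver.py | __pick_unassigned_variable_min_row
-- ===== SOURCE A (Python) =====
-- def __pick_unassigned_variable_min_row(board):
--     """
--     For Sudoku, I attempt to pick a variable that has the most possible values remaining
--     81 + 9 lookups
--     81 = count the number of unassigned variables for this row
--     9 = find the unassigned variable for this row
--     """
--     # try to find a row that has the fewest unassigned cells
--     # note that there will be at least one row with
--     min_row = 0
--     min_row_unassigned = 10
--     for rowi, row in enumerate(board):
--         num_unassigned = sum([
--             len(possible_values) > 1 for possible_values in row
--         ])
--         if num_unassigned < min_row_unassigned and num_unassigned > 0: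
--             min_row_unassigned = num_unassigned
--             min_row = rowi
--     assert min_row is not None, "The board is empty"
--     return __pick_unassigned_cell_row(board, min_row)
--
-- def __pick_unassigned_cell_row(board, rowi):
--     for coli in range(9):
--         if len(board[rowi][coli]) > 1:
--             return (rowi, coli)
--     raise Exception("unable to find unassigned cell in row")
-- ===== SOURCE B (Python) =====
-- def __pick_unassigned_variable_min_row(board):
--     # Pigeonhole buckets instead of a running minimum: a row's unassigned count
--     # of interest lies in 1..9, so record the FIRST row index seen for each
--     # count in a 10-slot table; the chosen row is the first populated slot of
--     # first_row_with[1:] (default row 0), and its first cell with >1 candidates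
--     # among the first nine columns is returned.
--     first_row_with = [None] * 10
--     for rowi, row in enumerate(board):
--         k = 0
--         for cell in row:
--             if len(cell) > 1:
--                 k += 1
--         if 0 < k < 10 and first_row_with[k] is None:
--             first_row_with[k] = rowi
--     rowi = next((r for r in first_row_with[1:] if r is not None), 0)
--     coli = next(i for i, cell in enumerate(board[rowi][:9]) if len(cell) > 1)
--     return (rowi, coli)
-- ===== Notes on version B (the rewrite author's own statement) =====
-- stated objective: alternative
-- what changed: A's running-minimum loop over rows plus a separate helper rescanning the chosen row are replaced by a pigeonhole bucket table indexed by the unassigned count (1..9) recording the first row per count; the first populated bucket (default row 0) names the row and a next() over its first nine cells names the column.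
import Mathlib
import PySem

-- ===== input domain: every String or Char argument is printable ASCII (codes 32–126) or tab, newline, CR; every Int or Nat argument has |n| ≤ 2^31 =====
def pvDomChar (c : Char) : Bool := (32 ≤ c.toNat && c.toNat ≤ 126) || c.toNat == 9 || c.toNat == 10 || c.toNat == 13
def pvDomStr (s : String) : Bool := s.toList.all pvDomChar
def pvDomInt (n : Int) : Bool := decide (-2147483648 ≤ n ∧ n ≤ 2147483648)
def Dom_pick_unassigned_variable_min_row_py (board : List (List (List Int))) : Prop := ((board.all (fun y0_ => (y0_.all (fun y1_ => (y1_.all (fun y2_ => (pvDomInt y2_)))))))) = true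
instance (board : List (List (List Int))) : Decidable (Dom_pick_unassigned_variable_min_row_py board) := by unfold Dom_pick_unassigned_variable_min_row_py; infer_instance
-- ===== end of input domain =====

-- B replaces A's running-minimum loop plus separate rescan helper by a pigeonhole
-- bucket table indexed by the unassigned count (1..9): the first row seen for each
-- count is recorded once, the first populated bucket (default row 0) names the row,
-- and a next() over that row's first nine cells names the column; same cost.

-- ===== PORT A =====
-- sum([len(possible_values) > 1 for possible_values in row])
def pvCntA (row : List (List Int)) : Int :=
  (row.map (fun possible_values => if 1 < possible_values.length then (1 : Int) else 0)).sum

-- the enumerate loop maintaining (min_row, min_row_unassigned); the assert is always true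
def pvSelA (board : List (List (List Int))) : Int × Int :=
  (PySem.List.enumerate board).foldl
    (fun st p =>
      let num := pvCntA p.2
      if num < st.2 ∧ 0 < num then (p.1, num) else st)
    (0, 10)

-- __pick_unassigned_cell_row's 'for coli in range(9)' loop; (-1, -1) marks the raising
-- paths (IndexError / the explicit Exception), all excluded by Pre_
def pvScanA (board : List (List (List Int))) (rowi : Int) : List Int → Int × Int
  | [] => (-1, -1)
  | coli :: rest =>
    match PySem.List.pyGet? board rowi with
    | none => (-1, -1)
    | some row =>
      match PySem.List.pyGet? row coli with
      | none => (-1, -1)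
      | some cell => if 1 < cell.length then (rowi, coli) else pvScanA board rowi rest

def pick_unassigned_variable_min_row_py (board : List (List (List Int))) : Int × Int :=
  pvScanA board (pvSelA board).1 (PySem.List.pyRange 0 9)

-- ===== PORT B =====
-- the inner 'k = 0; for cell in row: if len(cell) > 1: k += 1' loop
def pvCntB (row : List (List Int)) : Int :=
  row.foldl (fun k cell => if 1 < cell.length then k + 1 else k) 0

-- the bucket table: first_row_with = [None]*10, filled once per count (k.toNat is
-- exact: the branch guarantees 0 < k)
def pvBucketsB (board : List (List (List Int))) : List (Option Int) :=
  (PySem.List.enumerate board).foldl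
    (fun bk p =>
      let k := pvCntB p.2
      if 0 < k ∧ k < 10 then
        if bk[k.toNat]?.getD none = none then bk.set k.toNat (some p.1) else bk
      else bk)
    (List.replicate 10 none)

-- next((r for r in first_row_with[1:] if r is not None), 0)
def pvRowB (board : List (List (List Int))) : Int :=
  match ((pvBucketsB board).drop 1).findSome? id with
  | some r => r
  | none => 0

-- next(i for i, cell in enumerate(board[rowi][:9]) if len(cell) > 1); none = StopIteration
def pvFirstB (row : List (List Int)) : Option Int :=
  (PySem.List.enumerate (PySem.List.slice row none (some 9))).findSome?
    (fun p => if 1 < p.2.length then some p.1 else none)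

def pick_unassigned_variable_min_row_py_alt (board : List (List (List Int))) : Int × Int :=
  match PySem.List.pyGet? board (pvRowB board) with
  | none => (-1, -1)
  | some row =>
    match pvFirstB row with
    | none => (-1, -1)
    | some coli => (pvRowB board, coli)

-- ===== PRECONDITION & SPEC =====
def pvCnt (row : List (List Int)) : Nat := row.countP (fun c => decide (1 < c.length))

-- Pre_ admits the inputs on which A returns (elsewhere A raises its Exception, an
-- IndexError on an empty board, or an IndexError scanning a too-short row), except
-- that it also asks EVERY row with unassigned cells (not just the chosen one) to have
-- one among its first nine columns — the Sudoku row shape A's fixed range(9) scan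
-- assumes; the few returning boards this drops (an unchosen over-long row, all of its
-- unassigned cells beyond column 8) get identical values from A and B anyway.
def Pre_pick_unassigned_variable_min_row_py (board : List (List (List Int))) : Prop :=
  (∀ row ∈ board, 0 < pvCnt row → 0 < pvCnt (row.take 9)) ∧
  ((∃ row ∈ board, 0 < pvCnt row ∧ pvCnt row < 10) ∨ 0 < pvCnt (board.getD 0 []))

instance (board : List (List (List Int))) : Decidable (Pre_pick_unassigned_variable_min_row_py board) := by
  unfold Pre_pick_unassigned_variable_min_row_py; infer_instance

def pvWitness_pick_unassigned_variable_min_row_py : List (List (List Int)) := [[[1, 2], [1]]]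

def Spec_pick_unassigned_variable_min_row_py (board : List (List (List Int))) (out : Int × Int) : Prop := out = pick_unassigned_variable_min_row_py_alt board
instance (board : List (List (List Int))) (out : Int × Int) : Decidable (Spec_pick_unassigned_variable_min_row_py board out) := by unfold Spec_pick_unassigned_variable_min_row_py; infer_instance

-- ===== CLAIM (what is proved, stated in full; the proofs are below) =====
def Claim_equal_pick_unassigned_variable_min_row_py : Prop := ∀ (board : List (List (List Int))), Dom_pick_unassigned_variable_min_row_py board → Pre_pick_unassigned_variable_min_row_py board → Spec_pick_unassigned_variable_min_row_py board (pick_unassigned_variable_min_row_py board)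

-- ===== LEMMAS AND PROOFS =====

-- the two transliterated counts are both the number of cells with more than one candidate
lemma pvCntA_eq (row : List (List Int)) : pvCntA row = (pvCnt row : Int) := by
  unfold pvCntA pvCnt
  rw [show (fun possible_values : List Int => if 1 < possible_values.length then (1 : Int) else 0)
        = (fun pv : List Int => if (fun c : List Int => decide (1 < c.length)) pv = true then (1 : Int) else 0) by
      funext pv; simp]
  exact PySem.List.sum_map_ite_one_zero _ row

lemma pvCntB_eq (row : List (List Int)) : pvCntB row = (pvCnt row : Int) := by
  unfold pvCntB pvCnt
  rw [show (fun (k : Int) (cell : List Int) => if 1 < cell.length then k + 1 else k)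
        = (fun (k : Int) (cell : List Int) => if (fun c : List Int => decide (1 < c.length)) cell = true then k + 1 else k) by
      funext k cell; by_cases h : 1 < cell.length <;> simp [h]]
  rw [PySem.List.foldl_count_if]
  simp

lemma selA_append (bs : List (List (List Int))) (row : List (List Int)) :
    pvSelA (bs ++ [row]) =
      (if (pvCnt row : Int) < (pvSelA bs).2 ∧ 0 < (pvCnt row : Int)
        then ((bs.length : Int), (pvCnt row : Int)) else pvSelA bs) := by
  unfold pvSelA
  rw [PySem.List.enumerate_append, List.foldl_append]
  simp [PySem.List.enumerate_cons, pvCntA_eq]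

lemma bucketsB_append (bs : List (List (List Int))) (row : List (List Int)) :
    pvBucketsB (bs ++ [row]) =
      (if 0 < (pvCnt row : Int) ∧ (pvCnt row : Int) < 10 then
        if (pvBucketsB bs)[pvCnt row]?.getD none = none
        then (pvBucketsB bs).set (pvCnt row) (some (bs.length : Int))
        else pvBucketsB bs
       else pvBucketsB bs) := by
  unfold pvBucketsB
  rw [PySem.List.enumerate_append, List.foldl_append]
  simp only [PySem.List.enumerate_cons, PySem.List.enumerate_nil, List.foldl_cons, List.foldl_nil,
    pvCntB_eq]
  have h1 : ((pvCnt row : Int)).toNat = pvCnt row := Int.toNat_natCast _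
  by_cases h : 0 < (pvCnt row : Int) ∧ (pvCnt row : Int) < 10
  · rw [if_pos h, if_pos h, h1]
    simp only [zero_add]
  · rw [if_neg h, if_neg h]

-- first some in a list of options
lemma findSome?_first {α : Type} (l : List (Option α)) (j : Nat) (x : α)
    (hj : l[j]? = some (some x)) (hn : ∀ i, i < j → l[i]? = some none) :
    l.findSome? id = some x := by
  induction l generalizing j with
  | nil => simp at hj
  | cons a t ih =>
    cases j with
    | zero =>
      simp at hj
      simp [List.findSome?, hj]
    | succ j' =>
      have ha : a = none := by
        have := hn 0 (Nat.succ_pos _)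
        simpa using this
      subst ha
      rw [List.findSome?]
      simp only [id]
      exact ih j' (by simpa using hj) (fun i hi => by simpa using hn (i+1) (by omega))

lemma replD (k : Nat) (hk : k < 10) : ((List.replicate 10 (none : Option Int))[k]?).getD none = none := by
  rw [List.getElem?_replicate]
  simp [hk]

lemma replSome (k : Nat) (hk : k < 10) : (List.replicate 10 (none : Option Int))[k]? = some none := by
  rw [List.getElem?_replicate]
  simp [hk]

-- joint invariant of A's running-minimum fold and B's bucket table
def BInv (board : List (List (List Int))) : Prop :=
  (pvSelA board = (0, 10) ∧ pvBucketsB board = List.replicate 10 none ∧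
     ∀ row ∈ board, ¬(0 < pvCnt row ∧ pvCnt row < 10)) ∨
  (∃ (rn : Nat) (row : List (List Int)), board[rn]? = some row ∧
     0 < pvCnt row ∧ pvCnt row < 10 ∧
     pvSelA board = ((rn : Int), (pvCnt row : Int)) ∧
     (pvBucketsB board).length = 10 ∧
     (pvBucketsB board)[pvCnt row]? = some (some (rn : Int)) ∧
     ∀ k, 0 < k → k < pvCnt row → (pvBucketsB board)[k]? = some none)

lemma b_inv (board : List (List (List Int))) : BInv board := by
  induction board using List.reverseRecOn with
  | nil =>
    left
    refine ⟨rfl, rfl, by simp⟩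
  | append_singleton bs row ih =>
    have hlen : (bs ++ [row])[bs.length]? = some row := by simp
    rcases ih with ⟨hsel, hbk, hbad⟩ | ⟨rn, row', hsome, hpos, hlt10, hsel, hblen, hbc, hbk⟩
    · by_cases hc : 0 < pvCnt row ∧ pvCnt row < 10
      · right
        refine ⟨bs.length, row, hlen, hc.1, hc.2, ?_, ?_, ?_, ?_⟩
        · rw [selA_append, hsel]
          rw [if_pos (by dsimp only; omega)]
        · rw [bucketsB_append, hbk]
          rw [if_pos (by omega), if_pos (replD _ hc.2)]
          simp
        · rw [bucketsB_append, hbk]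
          rw [if_pos (by omega), if_pos (replD _ hc.2)]
          rw [List.getElem?_set_self]
          simp [hc.2]
        · intro k hk0 hkc
          rw [bucketsB_append, hbk]
          rw [if_pos (by omega), if_pos (replD _ hc.2)]
          rw [List.getElem?_set_ne (by omega)]
          exact replSome k (by omega)
      · left
        refine ⟨?_, ?_, ?_⟩
        · rw [selA_append, hsel]
          rw [if_neg (by omega)]
        · rw [bucketsB_append, hbk]
          rw [if_neg (by omega)]
        · intro r hr
          rcases List.mem_append.mp hr with h | h
          · exact hbad r h
          · simp only [List.mem_singleton] at h
            subst h
            exact hc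
    · have hrn : rn < bs.length := (List.getElem?_eq_some_iff.mp hsome).1
      right
      have hclen : pvCnt row' < (pvBucketsB bs).length := by omega
      by_cases hc : 0 < pvCnt row ∧ (pvCnt row : Int) < (pvCnt row' : Int)
      · have hcnat : pvCnt row < pvCnt row' := by exact_mod_cast hc.2
        have hbnone : (pvBucketsB bs)[pvCnt row]? = some none := hbk _ hc.1 hcnat
        refine ⟨bs.length, row, hlen, hc.1, by omega, ?_, ?_, ?_, ?_⟩
        · rw [selA_append, hsel]
          rw [if_pos (by dsimp only; omega)]
        · rw [bucketsB_append]
          rw [if_pos (by constructor <;> [exact_mod_cast hc.1; exact_mod_cast (by omega : pvCnt row < 10)]),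
            if_pos (by rw [hbnone]; rfl)]
          simpa using hblen
        · rw [bucketsB_append]
          rw [if_pos (by constructor <;> [exact_mod_cast hc.1; exact_mod_cast (by omega : pvCnt row < 10)]),
            if_pos (by rw [hbnone]; rfl)]
          rw [List.getElem?_set_self]
          omega
        · intro k hk0 hkc
          rw [bucketsB_append]
          rw [if_pos (by constructor <;> [exact_mod_cast hc.1; exact_mod_cast (by omega : pvCnt row < 10)]),
            if_pos (by rw [hbnone]; rfl)]
          rw [List.getElem?_set_ne (by omega)]
          exact hbk k hk0 (by omega)
      · refine ⟨rn, row', ?_, hpos, hlt10, ?_, ?_, ?_, ?_⟩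
        · rw [List.getElem?_append_left hrn]
          exact hsome
        · rw [selA_append, hsel]
          rw [if_neg (by omega)]
        all_goals {
          rw [bucketsB_append]
          by_cases hc2 : 0 < (pvCnt row : Int) ∧ (pvCnt row : Int) < 10
          · rw [if_pos hc2]
            have hcge : pvCnt row' ≤ pvCnt row := by
              have : 0 < pvCnt row := by exact_mod_cast hc2.1
              omega
            by_cases hset : (pvBucketsB bs)[pvCnt row]?.getD none = none
            · rw [if_pos hset]
              have hne : pvCnt row ≠ pvCnt row' := by
                intro h
                rw [h, hbc] at hset
                simp at hset
              first
              | (simpa using hblen)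
              | (rw [List.getElem?_set_ne (by omega)]; exact hbc)
              | (intro k hk0 hkc
                 rw [List.getElem?_set_ne (by omega)]
                 exact hbk k hk0 hkc)
            · rw [if_neg hset]
              first
              | exact hblen
              | exact hbc
              | exact hbk
          · rw [if_neg hc2]
            first
            | exact hblen
            | exact hbc
            | exact hbk }

lemma scanA_loop (board : List (List (List Int))) (ri : Int) (row : List (List Int))
    (hget : PySem.List.pyGet? board ri = some row) (j : Nat) (hj9 : j < 9) (hjlen : j < row.length)
    (hpj : 1 < row[j].length) (hmin : ∀ i (h : i < j), ¬ 1 < (row[i]'(Nat.lt_trans h hjlen)).length) :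
    ∀ (n i : Nat), i + n = j → pvScanA board ri (PySem.List.pyRange (i : Int) 9) = (ri, (j : Int)) := by
  intro n
  induction n with
  | zero =>
    intro i hi
    have hij : i = j := by omega
    subst hij
    rw [PySem.List.pyRange_one_cons (by exact_mod_cast hj9)]
    rw [pvScanA, hget]
    dsimp only
    rw [PySem.List.pyGet?_natCast, List.getElem?_eq_getElem hjlen]
    simp [hpj]
  | succ n ih =>
    intro i hi
    have hilt : i < j := by omega
    have hile : i < row.length := Nat.lt_trans hilt hjlen
    rw [PySem.List.pyRange_one_cons (by exact_mod_cast (by omega : i < 9))]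
    rw [pvScanA, hget]
    dsimp only
    rw [PySem.List.pyGet?_natCast, List.getElem?_eq_getElem hile]
    have : ((i : Int) + 1) = ((i + 1 : Nat) : Int) := by push_cast; ring
    dsimp only
    rw [if_neg (hmin i hilt), this, ih (i+1) (by omega)]

lemma firstB_loop (xs : List (List Int)) (j : Nat) (hjlen : j < xs.length)
    (hpj : 1 < xs[j].length) (hmin : ∀ i (h : i < j), ¬ 1 < (xs[i]'(Nat.lt_trans h hjlen)).length) :
    ∀ s : Int, (PySem.List.enumerate xs s).findSome?
      (fun p => if 1 < p.2.length then some p.1 else none) = some (s + (j : Int)) := by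
  induction xs generalizing j with
  | nil => simp at hjlen
  | cons x t ih =>
    intro s
    rw [PySem.List.enumerate_cons]
    cases j with
    | zero =>
      simp at hpj
      simp [List.findSome?, hpj]
    | succ j' =>
      have hx : ¬ 1 < x.length := by simpa using hmin 0 (Nat.succ_pos _)
      have ht : j' < t.length := by simpa using hjlen
      have hpj' : 1 < t[j'].length := by simpa using hpj
      have hmin' : ∀ i (h : i < j'), ¬ 1 < (t[i]'(Nat.lt_trans h ht)).length := by
        intro i h
        have := hmin (i+1) (by omega)
        simpa using this
      rw [List.findSome?]
      simp only [hx]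
      rw [ih j' ht hpj' hmin' (s+1)]
      push_cast
      ring_nf

-- where both programs scan the chosen row: the first unassigned index among its first nine cells
lemma agree_at (board : List (List (List Int))) (rn : Nat) (row : List (List Int))
    (hsome : board[rn]? = some row) (hq : 0 < pvCnt (row.take 9)) :
    pvScanA board (rn : Int) (PySem.List.pyRange 0 9)
        = ((rn : Int), (((row.take 9).findIdx (fun c => decide (1 < c.length)) : Nat) : Int))
      ∧ pvFirstB row = some (((row.take 9).findIdx (fun c => decide (1 < c.length)) : Nat) : Int) := by
  have hjt : (row.take 9).findIdx (fun c => decide (1 < c.length)) < (row.take 9).length :=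
    List.findIdx_lt_length.mpr (List.countP_pos_iff.mp hq)
  have htlen : (row.take 9).length ≤ 9 := by simp
  have htlen2 : (row.take 9).length ≤ row.length := by simp
  have hj9 : (row.take 9).findIdx (fun c => decide (1 < c.length)) < 9 := lt_of_lt_of_le hjt htlen
  have hjlen : (row.take 9).findIdx (fun c => decide (1 < c.length)) < row.length :=
    lt_of_lt_of_le hjt htlen2
  have hpjT : 1 < ((row.take 9)[(row.take 9).findIdx (fun c => decide (1 < c.length))]'hjt).length := by
    have := List.findIdx_getElem (w := hjt)
    simpa using this
  have hpj : 1 < (row[(row.take 9).findIdx (fun c => decide (1 < c.length))]'hjlen).length := by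
    rw [← List.getElem_take (h := hjt)]
    exact hpjT
  have hminT : ∀ i (h : i < (row.take 9).findIdx (fun c => decide (1 < c.length))),
      ¬ 1 < ((row.take 9)[i]'(Nat.lt_trans h hjt)).length := by
    intro i h
    have := List.not_of_lt_findIdx (p := fun c : List Int => decide (1 < c.length)) (xs := row.take 9) h
    simpa using this
  have hmin : ∀ i (h : i < (row.take 9).findIdx (fun c => decide (1 < c.length))),
      ¬ 1 < (row[i]'(Nat.lt_trans h hjlen)).length := by
    intro i h
    rw [← List.getElem_take (h := Nat.lt_trans h hjt)]
    exact hminT i h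
  have hget : PySem.List.pyGet? board (rn : Int) = some row := by
    rw [PySem.List.pyGet?_natCast]; exact hsome
  constructor
  · have := scanA_loop board (rn : Int) row hget _ hj9 hjlen hpj hmin ((row.take 9).findIdx (fun c => decide (1 < c.length))) 0 (by omega)
    simpa using this
  · have := firstB_loop (row.take 9) _ hjt hpjT hminT 0
    unfold pvFirstB
    rw [show PySem.List.slice row none (some 9) = row.take 9 by
      have := PySem.List.slice_to_natCast (xs := row) (b := 9)
      simpa using this]
    rw [this]
    simp

-- B's chosen row equals A's selected row, from the joint invariant
lemma rowB_case1 (board : List (List (List Int)))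
    (hbk : pvBucketsB board = List.replicate 10 none) : pvRowB board = 0 := by
  unfold pvRowB
  rw [hbk]
  rfl

lemma rowB_case2 (board : List (List (List Int))) (rn : Nat) (c : Nat)
    (hc0 : 0 < c) (hc10 : c < 10)
    (hblen : (pvBucketsB board).length = 10)
    (hbc : (pvBucketsB board)[c]? = some (some (rn : Int)))
    (hbk : ∀ k, 0 < k → k < c → (pvBucketsB board)[k]? = some none) :
    pvRowB board = (rn : Int) := by
  unfold pvRowB
  rw [findSome?_first ((pvBucketsB board).drop 1) (c - 1) (rn : Int)
      (by rw [List.getElem?_drop]; rw [show 1 + (c - 1) = c by omega]; exact hbc)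
      (fun i hi => by
        rw [List.getElem?_drop]
        exact hbk (1 + i) (by omega) (by omega))]

-- ===== VERDICT (by name: the statement is the Claim_ definition above) =====
theorem pick_unassigned_variable_min_row_py_spec : Claim_equal_pick_unassigned_variable_min_row_py := by
  intro board _hdom hpre
  unfold Spec_pick_unassigned_variable_min_row_py
  obtain ⟨hall, hex⟩ := hpre
  rcases b_inv board with ⟨hA, hbk, hbad⟩ | ⟨rn, row, hsome, hpos, hlt10, hA, hblen, hbc, hbk⟩
  · -- no row with 1..9 unassigned cells: both programs fall back to row 0
    have h0 : 0 < pvCnt (board.getD 0 []) := by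
      rcases hex with ⟨r, hr, hgood⟩ | h0
      · exact absurd hgood (hbad r hr)
      · exact h0
    cases board with
    | nil => simp [pvCnt] at h0
    | cons r0 t =>
      have hsome0 : (r0 :: t)[0]? = some r0 := rfl
      have h0' : 0 < pvCnt r0 := by simpa using h0
      have hq : 0 < pvCnt (r0.take 9) := hall r0 (List.mem_cons_self) h0'
      obtain ⟨hscan, hfirst⟩ := agree_at (r0 :: t) 0 r0 hsome0 hq
      have hrowB : pvRowB (r0 :: t) = 0 := rowB_case1 _ hbk
      unfold pick_unassigned_variable_min_row_py pick_unassigned_variable_min_row_py_alt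
      rw [hA, hrowB]
      simp only [Nat.cast_zero] at hscan
      rw [hscan]
      have hget0 : PySem.List.pyGet? (r0 :: t) (0 : Int) = some r0 := by simp
      rw [hget0]
      dsimp only
      rw [hfirst]
  · -- a row with 1..9 unassigned cells was selected: both programs use the same row
    have hmem : row ∈ board := List.mem_of_getElem? hsome
    have hq : 0 < pvCnt (row.take 9) := hall row hmem hpos
    obtain ⟨hscan, hfirst⟩ := agree_at board rn row hsome hq
    have hrowB : pvRowB board = (rn : Int) := rowB_case2 board rn _ hpos hlt10 hblen hbc hbk
    unfold pick_unassigned_variable_min_row_py pick_unassigned_variable_min_row_py_alt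
    rw [hA, hrowB]
    dsimp only
    rw [hscan]
    have hget : PySem.List.pyGet? board ((rn : Nat) : Int) = some row := by
      rw [PySem.List.pyGet?_natCast]; exact hsome
    rw [hget]
    dsimp only
    rw [hfirst]
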